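-- pv_equiv track=rewrite | github.com/jrdonat/Advent-of-Code-2024 | Solutions/Day 7/Part 1.py | generate_equation
-- ===== SOURCE A (Python) =====
-- import itertools
--
-- def generate_equation(string, operators):
--     indices = [i for i, char in enumerate(string) if char == ' ']
--
--     combos = itertools.product(operators, repeat=len(indices))
--
--     results = []
--     for combo in combos:
--         temp = list(string)
--         for index, replacement in zip(indices, combo):
--             temp[index] = replacement
--         results.append(''.join(temp))
--     for i in range(len(indices)):
--         results = [f"({result}" for result in results]
--     return results
-- ===== SOURCE B (Python) =====
-- def generate_equation(string, operators):
--     parts = string.split(' ')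
--
--     def build(segs):
--         if len(segs) == 1:
--             return [segs[0]]
--         return [segs[0] + op + rest for op in operators for rest in build(segs[1:])]
--
--     prefix = '(' * (len(parts) - 1)
--     return [prefix + s for s in build(parts)]
-- ===== Notes on version B (the rewrite author's own statement) =====
-- stated objective: idiomatic
-- what changed: B splits the string once into constant segments and builds each result by recursively interleaving segments with operators, prefixing '('*k once, instead of A's per-combo char-list copy and mutation at precomputed space indices via itertools.product plus k whole-list rewriting passes for the paren prefix.
import Mathlib
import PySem

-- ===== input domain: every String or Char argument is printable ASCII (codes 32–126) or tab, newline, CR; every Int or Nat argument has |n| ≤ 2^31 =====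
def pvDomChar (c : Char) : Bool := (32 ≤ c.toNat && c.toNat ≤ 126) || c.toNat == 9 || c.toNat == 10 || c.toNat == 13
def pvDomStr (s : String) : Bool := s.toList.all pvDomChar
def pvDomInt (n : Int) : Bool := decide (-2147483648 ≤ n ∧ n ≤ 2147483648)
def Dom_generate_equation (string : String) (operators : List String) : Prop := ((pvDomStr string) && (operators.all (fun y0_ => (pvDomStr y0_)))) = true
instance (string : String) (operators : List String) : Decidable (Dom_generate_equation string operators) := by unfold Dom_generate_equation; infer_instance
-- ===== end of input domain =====

-- B replaces A's char-list mutation + itertools.product + k prefix passes by a single split and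
-- recursive segment interleaving (same outputs, same order); equivalence proved on all inputs.

-- ===== PORT A =====
-- itertools.product(operators, repeat=n), in itertools' order (leftmost position varies slowest)
def pyProduct (operators : List String) : Nat → List (List String)
  | 0 => [[]]
  | n + 1 => operators.flatMap (fun x => (pyProduct operators n).map (fun combo => x :: combo))

def generate_equation (string : String) (operators : List String) : List String :=
  -- indices = [i for i, char in enumerate(string) if char == ' ']
  let indices : List Int :=
    ((PySem.List.enumerate string.toList).filter (fun p => p.2 == ' ')).map (fun p => p.1)
  -- combos = itertools.product(operators, repeat=len(indices))
  let combos := pyProduct operators indices.length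
  -- for combo in combos: temp = list(string); temp[index] = replacement; results.append(''.join(temp))
  -- (each index comes from enumerate, hence is ≥ 0, so .toNat is exact here)
  let results := combos.map (fun combo =>
    let temp : List String := string.toList.map (fun c => String.ofList [c])
    let temp := ((indices.zip combo).foldl (fun t q => t.set q.1.toNat q.2) temp)
    PySem.Str.join "" temp)
  -- for i in range(len(indices)): results = [f"({result}" for result in results]
  (List.range indices.length).foldl (fun rs _ => rs.map (fun r => "(" ++ r)) results

-- ===== PORT B =====
-- build(segs): one result per choice of operators, interleaving segments with operators
def buildEq (operators : List String) : List (List Char) → List (List Char)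
  | [] => []
  | [p] => [p]
  | p :: q :: ps => operators.flatMap (fun op => (buildEq operators (q :: ps)).map (fun rest => p ++ op.toList ++ rest))

def generate_equation_alt (string : String) (operators : List String) : List String :=
  -- parts = string.split(' ')  (single-char separator: List.splitOn on the char list is exact)
  let parts : List (List Char) := string.toList.splitOn ' '
  -- prefix = '(' * (len(parts) - 1)
  let pref : List Char := List.replicate (parts.length - 1) '('
  -- [prefix + s for s in build(parts)]
  (buildEq operators parts).map (fun s => String.ofList (pref ++ s))

-- ===== PRECONDITION & SPEC =====
def Spec_generate_equation (string : String) (operators : List String) (out : List String) : Prop := out = generate_equation_alt string operators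
instance (string : String) (operators : List String) (out : List String) : Decidable (Spec_generate_equation string operators out) := by unfold Spec_generate_equation; infer_instance

-- ===== CLAIM (what is proved, stated in full; the proofs are below) =====
def Claim_equal_generate_equation : Prop := ∀ (string : String) (operators : List String), Dom_generate_equation string operators → Spec_generate_equation string operators (generate_equation string operators)

-- ===== LEMMAS AND PROOFS =====

-- the list of space indices starting the count at s
def spIdx (cs : List Char) (s : Int) : List Int :=
  ((PySem.List.enumerate cs s).filter (fun p => p.2 == ' ')).map (fun p => p.1)

-- list(string) after the replacement loop, computed structurally
def replList : List Char → List String → List String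
  | [], _ => []
  | c :: cs, [] => String.ofList [c] :: replList cs []
  | c :: cs, r :: combo =>
    if c = ' ' then r :: replList cs combo
    else String.ofList [c] :: replList cs (r :: combo)

-- the joined characters of the replaced list
def replChars : List Char → List String → List Char
  | [], _ => []
  | c :: cs, [] => c :: replChars cs []
  | c :: cs, r :: combo =>
    if c = ' ' then r.toList ++ replChars cs combo
    else c :: replChars cs (r :: combo)

-- interleaving of segments with operator strings
def interChs : List (List Char) → List String → List Char
  | [], _ => []
  | [p], _ => p
  | p :: _ :: _, [] => p
  | p :: q :: ps, r :: combo => p ++ r.toList ++ interChs (q :: ps) combo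

lemma spIdx_nil (s : Int) : spIdx [] s = [] := by
  simp [spIdx, PySem.List.enumerate]

lemma spIdx_cons (c : Char) (cs : List Char) (s : Int) :
    spIdx (c :: cs) s = if c = ' ' then s :: spIdx cs (s + 1) else spIdx cs (s + 1) := by
  by_cases h : c = ' ' <;>
    simp [spIdx, PySem.List.enumerate_cons, h]

lemma spIdx_shift (cs : List Char) (s : Int) :
    spIdx cs (s + 1) = (spIdx cs s).map (· + 1) := by
  induction cs generalizing s with
  | nil => simp [spIdx_nil]
  | cons c cs ih =>
    by_cases h : c = ' ' <;> simp [spIdx_cons, h, ih]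

lemma spIdx_nonneg (cs : List Char) (s : Int) : ∀ i ∈ spIdx cs s, s ≤ i := by
  induction cs generalizing s with
  | nil => simp [spIdx_nil]
  | cons c cs ih =>
    intro i hi
    rw [spIdx_cons] at hi
    by_cases h : c = ' '
    · simp [h] at hi
      rcases hi with rfl | hi
      · omega
      · have := ih (s + 1) i hi; omega
    · simp [h] at hi
      have := ih (s + 1) i hi; omega

lemma spIdx_length (cs : List Char) (s : Int) :
    (spIdx cs s).length = cs.countP (· == ' ') := by
  induction cs generalizing s with
  | nil => simp [spIdx_nil]
  | cons c cs ih =>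
    by_cases h : c = ' ' <;> simp [spIdx_cons, h, ih]

lemma foldl_set_shift (ps : List (Int × String)) (x : String) (ts : List String)
    (h : ∀ p ∈ ps, 0 ≤ p.1) :
    (ps.map (fun p => (p.1 + 1, p.2))).foldl (fun t q => t.set q.1.toNat q.2) (x :: ts)
      = x :: ps.foldl (fun t q => t.set q.1.toNat q.2) ts := by
  induction ps generalizing ts with
  | nil => simp
  | cons p ps ih =>
    have h0 : 0 ≤ p.1 := h p (by simp)
    have hk : (p.1 + 1).toNat = p.1.toNat + 1 := by omega
    simp only [List.map_cons, List.foldl_cons, hk, List.set]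
    exact ih _ (fun q hq => h q (by simp [hq]))

lemma replList_nil_combo (cs : List Char) :
    replList cs [] = cs.map (fun c => String.ofList [c]) := by
  induction cs with
  | nil => rfl
  | cons c cs ih => simp [replList, ih]

lemma foldl_set_eq_replList (cs : List Char) (combo : List String) :
    ((spIdx cs 0).zip combo).foldl (fun t q => t.set q.1.toNat q.2)
        (cs.map (fun c => String.ofList [c]))
      = replList cs combo := by
  induction cs generalizing combo with
  | nil => simp [spIdx_nil, replList]
  | cons c cs ih =>
    have hshift : spIdx cs (0 + 1) = (spIdx cs 0).map (· + 1) := spIdx_shift cs 0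
    have hmap : (Prod.map (fun x : Int => x + 1) (id : String → String))
        = (fun p : Int × String => (p.1 + 1, p.2)) := by
      funext p; cases p; rfl
    by_cases h : c = ' '
    · subst h
      cases combo with
      | nil =>
        simp [spIdx_cons, replList, replList_nil_combo]
      | cons r combo' =>
        have hnn' : ∀ p ∈ (spIdx cs 0).zip combo', 0 ≤ p.1 := by
          intro p hp
          exact spIdx_nonneg cs 0 p.1 (List.of_mem_zip hp).1
        rw [spIdx_cons, if_pos rfl, hshift]
        simp only [List.zip_cons_cons, List.foldl_cons, List.map_cons]
        have hset : ((String.ofList [' '] :: cs.map (fun c => String.ofList [c])).set (0:Int).toNat r)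
            = r :: cs.map (fun c => String.ofList [c]) := by simp
        rw [hset, List.zip_map_left, hmap, foldl_set_shift _ _ _ hnn', ih]
        simp [replList]
    · have hnn' : ∀ combo' : List String, ∀ p ∈ (spIdx cs 0).zip combo', 0 ≤ p.1 := by
        intro combo' p hp
        exact spIdx_nonneg cs 0 p.1 (List.of_mem_zip hp).1
      rw [spIdx_cons, if_neg h, hshift]
      simp only [List.map_cons]
      rw [List.zip_map_left, hmap, foldl_set_shift _ _ _ (hnn' combo), ih]
      cases combo with
      | nil => simp [replList]
      | cons r combo' => simp [replList, h]

lemma join_nil_cons (a : List Char) (t : List (List Char)) :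
    PySem.Chars.join [] (a :: t) = a ++ PySem.Chars.join [] t := by
  cases t with
  | nil => simp [PySem.Chars.join_singleton, PySem.Chars.join_nil]
  | cons b t => simp [PySem.Chars.join_cons_cons]

lemma join_replList (cs : List Char) (combo : List String) :
    PySem.Chars.join [] ((replList cs combo).map String.toList) = replChars cs combo := by
  induction cs generalizing combo with
  | nil => simp [replList, replChars, PySem.Chars.join_nil]
  | cons c cs ih =>
    cases combo with
    | nil => simp [replList, replChars, join_nil_cons, ih]
    | cons r combo' =>
      by_cases h : c = ' ' <;>
        simp [replList, replChars, h, join_nil_cons, ih]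

lemma replChars_nil_combo (cs : List Char) : replChars cs [] = cs := by
  induction cs with
  | nil => rfl
  | cons c cs ih => simp [replChars, ih]

lemma splitOn_space_ne_nil (cs : List Char) : cs.splitOn ' ' ≠ [] := by
  simp [List.splitOn]
  exact List.splitOnP_ne_nil _ cs

lemma splitOn_space_length (cs : List Char) :
    (cs.splitOn ' ').length = cs.countP (· == ' ') + 1 := by
  induction cs with
  | nil => simp [List.splitOn]
  | cons c cs ih =>
    by_cases h : c = ' ' <;>
      simp [List.splitOn, List.splitOnP_cons, h] at * <;>
      simpa [List.length_modifyHead] using ih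

lemma interChs_consHead (c : Char) (p : List Char) (ps : List (List Char)) (combo : List String)
    (h : ps ≠ [] → combo ≠ []) :
    interChs ((c :: p) :: ps) combo = c :: interChs (p :: ps) combo := by
  cases ps with
  | nil => cases combo <;> rfl
  | cons q ps =>
    cases combo with
    | nil => exact absurd rfl (h (by simp))
    | cons r combo' => simp [interChs]

lemma replChars_eq_interChs (cs : List Char) (combo : List String)
    (hlen : combo.length = cs.countP (· == ' ')) :
    replChars cs combo = interChs (cs.splitOn ' ') combo := by
  induction cs generalizing combo with
  | nil =>
    have : combo.length = 0 := by simpa using hlen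
    rcases List.length_eq_zero_iff.mp this with rfl
    simp [List.splitOn, replChars, interChs]
  | cons c cs ih =>
    by_cases h : c = ' '
    · subst h
      have : combo.length = cs.countP (· == ' ') + 1 := by
        simpa [List.countP_cons] using hlen
      cases combo with
      | nil => simp at this
      | cons r combo' =>
        have hlen' : combo'.length = cs.countP (· == ' ') := by
          simpa using this
        obtain ⟨q, ps, hq⟩ := List.exists_cons_of_ne_nil (splitOn_space_ne_nil cs)
        simp only [List.splitOn, List.splitOnP_cons, beq_self_eq_true, if_pos]
        rw [show (List.splitOnP (· == ' ') cs) = (' '::cs).tail.splitOn ' ' from rfl]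
        simp only [List.tail_cons, hq]
        simp [replChars, interChs, ih combo' hlen', hq]
    · have hlen' : combo.length = cs.countP (· == ' ') := by
        simpa [List.countP_cons, h] using hlen
      obtain ⟨q, ps, hq⟩ := List.exists_cons_of_ne_nil (splitOn_space_ne_nil cs)
      have hsplit : (c :: cs).splitOn ' ' = (c :: q) :: ps := by
        simp [List.splitOn, List.splitOnP_cons, h]
        rw [show (List.splitOnP (· == ' ') cs) = cs.splitOn ' ' from rfl, hq]
        rfl
      have hne : ps ≠ [] → combo ≠ [] := by
        intro hps
        obtain ⟨p', ps', rfl⟩ := List.exists_cons_of_ne_nil hps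
        have := splitOn_space_length cs
        rw [hq] at this
        simp at this
        intro hcombo
        rw [hcombo] at hlen'
        simp at hlen'
        omega
      rw [hsplit, interChs_consHead c q ps combo hne, ← hq]
      cases combo with
      | nil => simp [replChars, ← ih [] hlen', replChars_nil_combo]
      | cons r combo' => simp [replChars, h, ih (r :: combo') hlen']

lemma mem_pyProduct_length (ops : List String) (n : Nat) :
    ∀ combo ∈ pyProduct ops n, combo.length = n := by
  induction n with
  | zero => simp [pyProduct]
  | succ n ih =>
    intro combo hc
    simp [pyProduct] at hc
    obtain ⟨x, _, c, hc, rfl⟩ := hc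
    simp [ih c hc]

lemma buildEq_eq_map_interChs (ops : List String) (parts : List (List Char)) (h : parts ≠ []) :
    buildEq ops parts = (pyProduct ops (parts.length - 1)).map (fun combo => interChs parts combo) := by
  induction parts with
  | nil => exact absurd rfl h
  | cons p ps ih =>
    cases ps with
    | nil => simp [buildEq, pyProduct, interChs]
    | cons q ps' =>
      have ih' := ih (by simp)
      rw [show ((p :: q :: ps').length - 1) = ((q :: ps').length - 1) + 1 by simp]
      simp only [buildEq, ih', pyProduct, List.map_flatMap, List.map_map]
      simp [Function.comp_def, interChs]

lemma prefix_foldl (k : Nat) (rs : List String) :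
    (List.range k).foldl (fun rs _ => rs.map (fun r => "(" ++ r)) rs
      = rs.map (fun r => String.ofList (List.replicate k '(' ++ r.toList)) := by
  induction k with
  | zero =>
    simp
  | succ k ih =>
    rw [List.range_succ, List.foldl_append, ih]
    simp only [List.foldl_cons, List.foldl_nil, List.map_map, Function.comp_def]
    congr 1
    funext r
    rw [← String.toList_inj]
    simp [List.replicate_succ]

-- ===== VERDICT (by name: the statement is the Claim_ definition above) =====
theorem generate_equation_spec : Claim_equal_generate_equation := by
  intro string operators _
  unfold Spec_generate_equation generate_equation generate_equation_alt
  dsimp only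
  set cs := string.toList with hcs
  have hidx : ((PySem.List.enumerate cs).filter (fun p => p.2 == ' ')).map (fun p => p.1)
      = spIdx cs 0 := rfl
  rw [hidx]
  set n := (spIdx cs 0).length with hn
  have hcount : n = cs.countP (· == ' ') := spIdx_length cs 0
  rw [prefix_foldl]
  rw [List.map_map]
  have hparts_ne := splitOn_space_ne_nil cs
  have hplen : (cs.splitOn ' ').length - 1 = n := by
    rw [splitOn_space_length]; omega
  rw [buildEq_eq_map_interChs operators (cs.splitOn ' ') hparts_ne, hplen, List.map_map]
  apply List.map_congr_left
  intro combo hcombo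
  have hclen : combo.length = cs.countP (· == ' ') := by
    rw [← hcount]; exact mem_pyProduct_length operators n combo hcombo
  simp only [Function.comp]
  rw [foldl_set_eq_replList]
  show String.ofList (List.replicate n '(' ++ (PySem.Str.join "" (replList cs combo)).toList) = _
  have hjoin : (PySem.Str.join "" (replList cs combo)).toList = replChars cs combo := by
    unfold PySem.Str.join
    simp only [String.toList_ofList]
    rw [show ("" : String).toList = ([] : List Char) from rfl]
    exact join_replList cs combo
  rw [hjoin, replChars_eq_interChs cs combo hclen]
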